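-- pv_equiv track=rewrite | github.com/chenye95/LeetCode_Progress | 1704_DetermineStringHalvesAlike.py | halves_alike
-- ===== SOURCE A (Python) =====
-- def halves_alike(s: str) -> bool:
--     """
--     :param s: string of even length of uppercase and lowercase letters
--     :return: whether the first half has the same amount of vowels as the second half
--     """
--     vowels_list = "aeiouAEIOU"
--
--     mid_len = len(s) // 2
--     first_half_over_second = 0
--     for c_1, c_2 in zip(s[:mid_len], s[mid_len:]):
--         if c_1 in vowels_list:
--             first_half_over_second += 1
--         if c_2 in vowels_list:
--             first_half_over_second -= 1
--
--     return first_half_over_second == 0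
-- ===== SOURCE B (Python) =====
-- def _vowel_count(half: str) -> int:
--     # histogram of the half, then sum the ten vowel entries
--     freq = {}
--     for c in half:
--         freq[c] = freq.get(c, 0) + 1
--     return sum(freq.get(v, 0) for v in "aeiouAEIOU")
--
--
-- def halves_alike(s: str) -> bool:
--     # the two halves of equal length mid (the docstring guarantees even length)
--     mid = len(s) // 2
--     return _vowel_count(s[:mid]) == _vowel_count(s[mid:2 * mid])
-- ===== Notes on version B (the rewrite author's own statement) =====
-- stated objective: alternative
-- what changed: Replaces A's fused zip loop with per-character vowel membership tests and a signed +1/-1 accumulator by building a character-frequency table (histogram) for each equal-length half and comparing the sums of the ten vowel entries.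
import Mathlib
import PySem

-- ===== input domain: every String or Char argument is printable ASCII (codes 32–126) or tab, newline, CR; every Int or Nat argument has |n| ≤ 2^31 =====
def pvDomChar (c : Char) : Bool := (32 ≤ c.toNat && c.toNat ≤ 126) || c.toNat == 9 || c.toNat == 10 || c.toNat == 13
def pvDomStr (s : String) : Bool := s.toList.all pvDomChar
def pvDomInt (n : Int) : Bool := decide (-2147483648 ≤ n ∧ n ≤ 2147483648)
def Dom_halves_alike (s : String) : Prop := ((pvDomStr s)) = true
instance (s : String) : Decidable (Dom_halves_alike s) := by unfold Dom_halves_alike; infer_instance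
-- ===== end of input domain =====

-- B replaces A's fused zip loop (signed +1/-1 accumulator with a per-character vowel
-- membership test) by building a character-frequency table per equal-length half and
-- comparing the sums of the ten vowel entries (objective: alternative).


-- ===== PORT A =====
def pvVowels : List Char := "aeiouAEIOU".toList

def halves_alike (s : String) : Bool :=
  let cs := s.toList
  let mid := cs.length / 2
  -- for c_1, c_2 in zip(s[:mid], s[mid:]): signed accumulator
  let d := ((cs.take mid).zip (cs.drop mid)).foldl
    (fun acc p =>
      let acc := if pvVowels.contains p.1 then acc + 1 else acc
      if pvVowels.contains p.2 then acc - 1 else acc) (0 : Int)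
  d == 0

-- ===== PORT B =====
-- _vowel_count: histogram of the half (freq[c] = freq.get(c, 0) + 1), then the sum of the ten vowel entries
def pvVowelCount (half : List Char) : Int :=
  let freq := half.foldl (fun d c => d.insert c (d.getD c 0 + 1)) (PySem.Dict.empty : PySem.Dict Char Int)
  (pvVowels.map (fun v => freq.getD v 0)).sum

def halves_alike_alt (s : String) : Bool :=
  let cs := s.toList
  let mid := cs.length / 2
  -- s[:mid] and s[mid:2*mid], the two halves of equal length mid
  pvVowelCount (cs.take mid) == pvVowelCount ((cs.drop mid).take mid)

-- ===== PRECONDITION & SPEC =====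
def Spec_halves_alike (s : String) (out : Bool) : Prop := out = halves_alike_alt s
instance (s : String) (out : Bool) : Decidable (Spec_halves_alike s out) := by unfold Spec_halves_alike; infer_instance

-- ===== CLAIM (what is proved, stated in full; the proofs are below) =====
def Claim_equal_halves_alike : Prop := ∀ (s : String), Dom_halves_alike s → Spec_halves_alike s (halves_alike s)

-- ===== LEMMAS AND PROOFS =====

-- A's fused zip fold = (signed) difference of the two vowel counts
theorem pv_fold_zip (l1 l2 : List Char) (acc : Int) :
    (l1.zip l2).foldl
      (fun acc p =>
        let acc := if pvVowels.contains p.1 then acc + 1 else acc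
        if pvVowels.contains p.2 then acc - 1 else acc) acc
    = acc + ((l1.take l2.length).countP (pvVowels.contains ·) : Int)
          - ((l2.take l1.length).countP (pvVowels.contains ·) : Int) := by
  induction l1 generalizing l2 acc with
  | nil => simp
  | cons a t ih =>
    cases l2 with
    | nil => simp
    | cons b t2 =>
      simp only [List.zip_cons_cons, List.foldl_cons, List.length_cons,
        List.take_succ_cons, List.countP_cons, ih]
      split_ifs <;> push_cast <;> ring

-- summing a characteristic 'if c = v' over a duplicate-free list
theorem pv_sum_indicator (V : List Char) (hV : V.Nodup) (c : Char) :
    (V.map (fun v => if c = v then (1 : Int) else 0)).sum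
      = if V.contains c then 1 else 0 := by
  induction V with
  | nil => simp
  | cons a t ih =>
    rcases List.nodup_cons.mp hV with ⟨ha, ht⟩
    simp only [List.map_cons, List.sum_cons, ih ht, List.contains_cons]
    by_cases h : c = a
    · subst h
      simp [ha]
    · simp [h]

theorem pv_sum_map_add (L : List Char) (f g : Char → Int) :
    (L.map (fun v => f v + g v)).sum = (L.map f).sum + (L.map g).sum := by
  induction L with
  | nil => simp
  | cons a t ih =>
    simp only [List.map_cons, List.sum_cons, ih]
    ring

-- summing per-character counts over the vowel list = one countP over the vowel test
theorem pv_count_sum (l : List Char) :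
    (pvVowels.map (fun v => (l.count v : Int))).sum
      = (l.countP (pvVowels.contains ·) : Int) := by
  induction l with
  | nil => simp
  | cons c t ih =>
    have hstep : (pvVowels.map (fun v => ((c :: t).count v : Int))).sum
        = (pvVowels.map (fun v => (t.count v : Int) + if c = v then (1 : Int) else 0)).sum := by
      apply congrArg List.sum
      apply List.map_congr_left
      intro v _
      by_cases h : c = v
      · subst h
        rw [List.count_cons_self, if_pos rfl]
        push_cast
        ring
      · rw [List.count_cons_of_ne h, if_neg h, add_zero]
    rw [hstep, pv_sum_map_add, ih, pv_sum_indicator pvVowels (by decide) c, List.countP_cons]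
    by_cases h : pvVowels.contains c = true
    · rw [if_pos h, if_pos h]
      push_cast
      ring
    · rw [if_neg h, if_neg (by simpa using h)]
      push_cast
      ring

-- the histogram lookup is the character count, so B's per-half sum is the vowel countP
theorem pv_vowelCount_eq (l : List Char) :
    pvVowelCount l = (l.countP (pvVowels.contains ·) : Int) := by
  show ((pvVowels.map (fun v =>
      (l.foldl (fun d c => d.insert c (d.getD c 0 + 1)) (PySem.Dict.empty : PySem.Dict Char Int)).getD v 0)).sum) = _
  rw [PySem.Dict.foldl_insert_getD_add_one_eq_counter]
  simp only [PySem.Dict.getD_counter]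
  exact pv_count_sum l

theorem pv_beq_int (a b : Nat) : (((a : Int)) == ((b : Int))) = decide (a = b) := by
  by_cases h : a = b
  · simp [h]
  · rw [decide_eq_false h, beq_eq_false_iff_ne]
    intro hc
    exact h (by exact_mod_cast hc)

-- ===== VERDICT (by name: the statement is the Claim_ definition above) =====
theorem halves_alike_spec : Claim_equal_halves_alike := by
  intro s _
  unfold Spec_halves_alike
  show (_ == (0 : Int)) = (pvVowelCount _ == pvVowelCount _)
  rw [pv_fold_zip, pv_vowelCount_eq, pv_vowelCount_eq, pv_beq_int]
  have hmid : s.toList.length / 2 ≤ s.toList.length := Nat.div_le_self _ _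
  have h1 : ((s.toList.drop (s.toList.length / 2)).length) = s.toList.length - s.toList.length / 2 :=
    List.length_drop
  have h2 : (s.toList.take (s.toList.length / 2)).length = s.toList.length / 2 := by
    rw [List.length_take]
    omega
  rw [h1, h2, List.take_of_length_le (l := s.toList.take (s.toList.length / 2)) (by rw [h2]; omega)]
  by_cases h : (s.toList.take (s.toList.length / 2)).countP (pvVowels.contains ·)
      = ((s.toList.drop (s.toList.length / 2)).take (s.toList.length / 2)).countP (pvVowels.contains ·)
  · rw [h]
    simp
  · rw [decide_eq_false h, beq_eq_false_iff_ne]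
    intro hc
    apply h
    omega
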